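-- pv_equiv track=rewrite | github.com/MrBrantCode/unitest_baseline | mut_generate/mist_train_taco/taco_8489/solution.py | count_distinct_reversed_strings
-- ===== SOURCE A (Python) =====
-- from collections import defaultdict
--
-- def count_distinct_reversed_strings(A: str) -> int:
--     N = len(A)
--     cnt = defaultdict(int)
--     ans = 1 + N * (N - 1) // 2
--
--     for a in A:
--         ans -= cnt[a]
--         cnt[a] += 1
--
--     return ans
-- ===== SOURCE B (Python) =====
-- def count_distinct_reversed_strings(A: str) -> int:
--     # Sort the characters so equal ones are contiguous, then scan once,
--     # adding for each position the number of earlier DIFFERENT characters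
--     # (earlier positions minus earlier members of the current equal run).
--     ans = 1
--     run = 0
--     seen = 0
--     prev = None
--     for c in sorted(A):
--         run = run + 1 if c == prev else 1
--         ans += seen - run + 1
--         seen += 1
--         prev = c
--     return ans
-- ===== Notes on version B (the rewrite author's own statement) =====
-- stated objective: alternative
-- what changed: Instead of A's hash-count pass that starts from 1+N*(N-1)//2 and subtracts the running count of each character, B sorts the characters and counts the differing pairs additively in one scan over the sorted runs (seen - run + 1 per position), never forming N*(N-1)//2 or a count table.
import Mathlib
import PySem

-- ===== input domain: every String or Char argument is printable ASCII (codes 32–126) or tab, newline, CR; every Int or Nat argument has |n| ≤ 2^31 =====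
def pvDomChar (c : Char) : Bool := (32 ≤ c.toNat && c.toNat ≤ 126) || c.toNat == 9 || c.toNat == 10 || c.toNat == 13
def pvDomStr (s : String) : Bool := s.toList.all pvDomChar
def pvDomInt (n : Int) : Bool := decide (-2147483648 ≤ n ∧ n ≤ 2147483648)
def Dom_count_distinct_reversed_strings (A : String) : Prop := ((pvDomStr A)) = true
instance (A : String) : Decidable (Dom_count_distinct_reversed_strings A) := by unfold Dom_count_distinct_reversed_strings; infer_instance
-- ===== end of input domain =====

-- B replaces A's hash-count pass (start from 1+N*(N-1)//2, subtract the running count of each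
-- character) by a sort-then-scan that counts the differing pairs additively over the sorted
-- runs; objective: an alternative, count-table-free algorithm of similar cost.

-- ===== PORT A =====
def count_distinct_reversed_strings (A : String) : Int :=
  let N : Int := PySem.Str.len A
  (A.toList.foldl
    (fun (st : PySem.Dict Char Int × Int) a =>
      (st.1.insert a (st.1.getD a 0 + 1), st.2 - st.1.getD a 0))
    (PySem.Dict.empty, 1 + PySem.Int.floordiv (N * (N - 1)) 2)).2

-- ===== PORT B =====
-- state (ans, run, seen, prev); 'c == prev' with prev = None is False, hence Option Char
def count_distinct_reversed_strings_alt (A : String) : Int :=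
  ((PySem.List.sorted A.toList (fun c => c) false).foldl
    (fun (st : Int × Int × Int × Option Char) c =>
      let run : Int := if some c = st.2.2.2 then st.2.1 + 1 else 1
      (st.1 + st.2.2.1 - run + 1, run, st.2.2.1 + 1, some c))
    (1, 0, 0, none)).1

-- ===== PRECONDITION & SPEC =====
def Spec_count_distinct_reversed_strings (A : String) (out : Int) : Prop := out = count_distinct_reversed_strings_alt A
instance (A : String) (out : Int) : Decidable (Spec_count_distinct_reversed_strings A out) := by unfold Spec_count_distinct_reversed_strings; infer_instance

-- ===== CLAIM (what is proved, stated in full; the proofs are below) =====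
def Claim_equal_count_distinct_reversed_strings : Prop := ∀ (A : String), Dom_count_distinct_reversed_strings A → Spec_count_distinct_reversed_strings A (count_distinct_reversed_strings A)

-- ===== LEMMAS AND PROOFS =====

-- f*(f-1)//2, the number of equal-position pairs for a frequency f
def pvC2 (f : Int) : Int := PySem.Int.floordiv (f * (f - 1)) 2

-- total number of equal-character index pairs of m, summed over distinct characters
def pvPairs (m : List Char) : Int :=
  ((PySem.Set.ofList m).map (fun c => pvC2 ((m.count c : Int)))).sum

-- C(len,2) minus the equal pairs: the number of differing index pairs of m
def pvG (m : List Char) : Int := pvC2 (m.length : Int) - pvPairs m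

-- the canonical run length after processing p: count of p's last character
def pvRun (p : List Char) : Int :=
  match p.getLast? with
  | none => 0
  | some a => (p.count a : Int)

lemma pvC2_succ (f : Int) : pvC2 (f + 1) = pvC2 f + f := by
  unfold pvC2
  obtain ⟨k, hk⟩ : Even (f * (f - 1)) := by
    have h := Int.even_mul_succ_self (f - 1)
    simpa [mul_comm, sub_add_cancel] using h
  rw [PySem.Int.floordiv_eq_ediv_of_pos (by norm_num),
      PySem.Int.floordiv_eq_ediv_of_pos (by norm_num)]
  have h2 : (f + 1) * (f + 1 - 1) = f * (f - 1) + 2 * f := by ring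
  rw [h2]
  omega

lemma pv_sum_ite (a : Char) (v : Int) :
    ∀ (S : List Char), S.Nodup → a ∈ S →
      (S.map (fun c => if c = a then v else 0)).sum = v := by
  intro S
  induction S with
  | nil => intro _ h; cases h
  | cons x t ih =>
    intro hnd hmem
    rcases List.mem_cons.mp hmem with rfl | hm
    · have h0 : (t.map (fun c => if c = a then v else 0)).sum = 0 := by
        apply List.sum_eq_zero
        intro y hy
        rcases List.mem_map.mp hy with ⟨c, hc, rfl⟩
        have hca : c ≠ a := fun h => (List.nodup_cons.mp hnd).1 (h ▸ hc)
        simp [hca]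
      simp [h0]
    · have hne : x ≠ a := fun h => (List.nodup_cons.mp hnd).1 (h ▸ hm)
      simp [hne, ih (List.nodup_cons.mp hnd).2 hm]

lemma pvPairs_append (m : List Char) (a : Char) :
    pvPairs (m ++ [a]) = pvPairs m + (m.count a : Int) := by
  unfold pvPairs
  by_cases hmem : a ∈ m
  · have hset : PySem.Set.ofList (m ++ [a]) = PySem.Set.ofList m := by
      simp [PySem.Set.ofList_append_singleton, hmem]
    rw [hset]
    have hmap : (PySem.Set.ofList m).map (fun c => pvC2 (((m ++ [a]).count c : Int)))
        = (PySem.Set.ofList m).map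
            (fun c => pvC2 ((m.count c : Int)) + (if c = a then (m.count a : Int) else 0)) := by
      apply List.map_congr_left
      intro c hc
      by_cases hca : c = a
      · subst hca
        have : (m ++ [c]).count c = m.count c + 1 := by simp
        rw [this]; push_cast; rw [pvC2_succ]; simp
      · have hac : a ≠ c := fun h => hca h.symm
        have : (m ++ [a]).count c = m.count c := by
          simp [List.count_append, hac]
        rw [this]; simp [hca]
    rw [hmap]
    rw [PySem.List.sum_map_add_int]
    rw [pv_sum_ite a _ _ (PySem.Set.nodup_ofList m) ((PySem.Set.mem_ofList _ _).mpr hmem)]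
  · have hset : PySem.Set.ofList (m ++ [a]) = PySem.Set.ofList m ++ [a] := by
      simp [PySem.Set.ofList_append_singleton, hmem]
    have hcnt0 : m.count a = 0 := List.count_eq_zero.mpr hmem
    rw [hset, List.map_append, List.sum_append]
    have hmap : (PySem.Set.ofList m).map (fun c => pvC2 (((m ++ [a]).count c : Int)))
        = (PySem.Set.ofList m).map (fun c => pvC2 ((m.count c : Int))) := by
      apply List.map_congr_left
      intro c hc
      have hcm : c ∈ m := (PySem.Set.mem_ofList _ _).mp hc
      have hac : a ≠ c := fun h => hmem (h ▸ hcm)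
      simp [List.count_append, hac]
    rw [hmap]
    have h1 : pvC2 (1 : Int) = 0 := by decide
    simp [List.count_append, hcnt0, h1]

-- pvG grows by len − count when a character is appended
lemma pvG_append (m : List Char) (a : Char) :
    pvG (m ++ [a]) = pvG m + (m.length : Int) - (m.count a : Int) := by
  unfold pvG
  rw [pvPairs_append]
  have : ((m ++ [a]).length : Int) = (m.length : Int) + 1 := by simp
  rw [this, pvC2_succ]
  ring

-- pvPairs only depends on the multiset of characters
lemma pvPairs_perm {m m' : List Char} (h : m.Perm m') : pvPairs m = pvPairs m' := by
  unfold pvPairs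
  have hperm : (PySem.Set.ofList m).Perm (PySem.Set.ofList m') := by
    apply (List.perm_ext_iff_of_nodup (PySem.Set.nodup_ofList m) (PySem.Set.nodup_ofList m')).mpr
    intro c
    rw [PySem.Set.mem_ofList, PySem.Set.mem_ofList]
    exact ⟨fun hc => h.mem_iff.mp hc, fun hc => h.mem_iff.mpr hc⟩
  have h1 : ((PySem.Set.ofList m).map (fun c => pvC2 ((m.count c : Int)))).Perm
      ((PySem.Set.ofList m').map (fun c => pvC2 ((m.count c : Int)))) := hperm.map _
  rw [h1.sum_eq]
  congr 1
  apply List.map_congr_left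
  intro c _
  rw [h.count_eq]

-- A's loop, started on the counter of an already-processed prefix p
lemma pv_loopA (l : List Char) : ∀ (p : List Char) (x : Int),
    (l.foldl
      (fun (st : PySem.Dict Char Int × Int) a =>
        (st.1.insert a (st.1.getD a 0 + 1), st.2 - st.1.getD a 0))
      (PySem.Dict.counter p, x)).2
      = x - (pvPairs (p ++ l) - pvPairs p) := by
  induction l with
  | nil => intro p x; simp
  | cons a t ih =>
    intro p x
    have hins : (PySem.Dict.counter p).insert a ((PySem.Dict.counter p).getD a 0 + 1)
        = PySem.Dict.counter (p ++ [a]) := by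
      rw [← PySem.Dict.foldl_insert_getD_add_one_eq_counter,
          ← PySem.Dict.foldl_insert_getD_add_one_eq_counter]
      rw [List.foldl_append]
      simp
    have hget : (PySem.Dict.counter p).getD a 0 = (p.count a : Int) :=
      PySem.Dict.getD_counter p a
    simp only [List.foldl_cons]
    rw [hins, hget, ih (p ++ [a]) (x - (p.count a : Int))]
    rw [pvPairs_append]
    have : p ++ a :: t = (p ++ [a]) ++ t := by simp
    rw [this]
    ring

-- in a (· ≤ ·)-pairwise list p ++ [a] ++ …, an 'a' inside p forces p to end in 'a'
lemma pv_count_eq_run (p : List Char) (a : Char)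
    (hs : (p ++ [a]).Pairwise (· ≤ ·)) (hne : p.getLast? ≠ some a) :
    p.count a = 0 := by
  rw [List.count_eq_zero]
  intro hmem
  have hp : p ≠ [] := by rintro rfl; cases hmem
  obtain ⟨i, hi, hia⟩ := List.mem_iff_getElem.mp hmem
  have hpp : p.Pairwise (· ≤ ·) := (List.pairwise_append.mp hs).1
  have hn : p.length - 1 < p.length := by
    have := List.length_pos_of_ne_nil hp; omega
  have hle1 : a ≤ p[p.length - 1] := by
    rcases Nat.lt_or_ge i (p.length - 1) with h | h
    · exact hia ▸ List.pairwise_iff_getElem.mp hpp i (p.length - 1) hi hn h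
    · have : i = p.length - 1 := by omega
      subst this; rw [hia]
  have hle2 : p[p.length - 1] ≤ a :=
    (List.pairwise_append.mp hs).2.2 _ (List.getElem_mem hn) a (List.mem_singleton_self a)
  apply hne
  rw [List.getLast?_eq_getElem?, List.getElem?_eq_getElem hn]
  exact congrArg some (le_antisymm hle2 hle1)

lemma pvRun_eq_count (p : List Char) (a : Char) (h : p.getLast? = some a) :
    pvRun p = (p.count a : Int) := by
  unfold pvRun; rw [h]

lemma pvRun_concat (p : List Char) (c : Char) :
    pvRun (p ++ [c]) = (p.count c : Int) + 1 := by
  unfold pvRun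
  rw [List.getLast?_concat]
  show ((p ++ [c]).count c : Int) = (p.count c : Int) + 1
  simp

-- B's loop, started from the canonical state of an already-processed prefix p
lemma pv_loopB (l : List Char) : ∀ (p : List Char) (x : Int),
    (p ++ l).Pairwise (· ≤ ·) →
    (l.foldl
      (fun (st : Int × Int × Int × Option Char) c =>
        let run : Int := if some c = st.2.2.2 then st.2.1 + 1 else 1
        (st.1 + st.2.2.1 - run + 1, run, st.2.2.1 + 1, some c))
      (x, pvRun p, (p.length : Int), p.getLast?)).1
      = x + pvG (p ++ l) - pvG p := by
  induction l with
  | nil => intro p x _; simp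
  | cons c t ih =>
    intro p x hs
    have hassoc : p ++ c :: t = (p ++ [c]) ++ t := by simp
    have hs' : ((p ++ [c]) ++ t).Pairwise (· ≤ ·) := by rw [← hassoc]; exact hs
    have hsc : (p ++ [c]).Pairwise (· ≤ ·) := (List.pairwise_append.mp hs').1
    -- run' = count of c in p ++ [c]
    have hrun : (if some c = p.getLast? then pvRun p + 1 else 1)
        = pvRun (p ++ [c]) := by
      rw [pvRun_concat]
      by_cases hl : p.getLast? = some c
      · rw [hl, if_pos rfl, pvRun_eq_count p c hl]
      · have hne : some c ≠ p.getLast? := fun h => hl h.symm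
        rw [if_neg hne, pv_count_eq_run p c hsc hl]
        simp
    have hcnt : pvRun (p ++ [c]) = (p.count c : Int) + 1 := pvRun_concat p c
    simp only [List.foldl_cons]
    rw [hrun]
    have hlen : (p.length : Int) + 1 = ((p ++ [c]).length : Int) := by simp
    have hlast : some c = (p ++ [c]).getLast? := List.getLast?_concat.symm
    rw [hlen, hlast]
    have hx : x + (p.length : Int) - pvRun (p ++ [c]) + 1
        = x + pvG (p ++ [c]) - pvG p := by
      rw [hcnt, pvG_append]; ring
    rw [hx, ih (p ++ [c]) _ hs', ← hassoc]
    ring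

-- ===== VERDICT (by name: the statement is the Claim_ definition above) =====
theorem count_distinct_reversed_strings_spec : Claim_equal_count_distinct_reversed_strings := by
  intro A _
  unfold Spec_count_distinct_reversed_strings
  unfold count_distinct_reversed_strings count_distinct_reversed_strings_alt
  simp only
  -- A side
  have hempty : (PySem.Dict.empty : PySem.Dict Char Int) = PySem.Dict.counter [] := rfl
  rw [hempty, pv_loopA A.toList [] _]
  -- B side: initial state is the canonical state of the empty prefix
  have hinit : ((1 : Int), (0 : Int), (0 : Int), (none : Option Char))
      = (1, pvRun [], (([] : List Char).length : Int), ([] : List Char).getLast?) := by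
    simp [pvRun]
  rw [hinit,
    pv_loopB (PySem.List.sorted A.toList (fun c => c) false) [] 1
      (by simpa using PySem.List.sorted_pairwise A.toList (fun c => c))]
  have hperm : (PySem.List.sorted A.toList (fun c => c) false).Perm A.toList :=
    PySem.List.sorted_perm _ _ _
  have hpairs : pvPairs (PySem.List.sorted A.toList (fun c => c) false) = pvPairs A.toList :=
    pvPairs_perm hperm
  have hlen : ((PySem.List.sorted A.toList (fun c => c) false).length : Int)
      = (A.toList.length : Int) := by
    rw [PySem.List.length_sorted]
  simp only [List.nil_append, pvG]
  rw [hpairs, hlen]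
  have hN : PySem.Str.len A = (A.toList.length : Int) := by
    rw [PySem.Str.len_eq]
  rw [hN]
  have hp0 : pvPairs ([] : List Char) = 0 := rfl
  have hc0 : pvC2 (((0:Nat) : Int)) = 0 := by decide
  unfold pvC2
  simp [hp0]
  ring
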